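-- pv_equiv track=rewrite | github.com/we24e/Computer-Security | test1/pow-create.py | check_0
-- ===== SOURCE A (Python) =====
-- def check_0(n3, hashed):
--     for i in hashed:
--         if i!=str(0):
--             if i==str(1):
--                 n3=n3+3
--             elif i==str(2) or i==str(3):
--                 n3=n3+2
--             elif i==str(4) or i==str(5) or i==str(6) or i==str(7):
--                 n3=n3+1
--             else:
--                 pass
--             break
--         else:
--             n3=n3+4
--     return n3
-- ===== SOURCE B (Python) =====
-- def check_0(n3, hashed):
--     # Recursive decomposition: peel leading "0"s structurally; the first-character
--     # bonus for digits 1..7 is the closed form 4 - bit_length(d) (3,2,2,1,1,1,1).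
--     if hashed and hashed[0] == "0":
--         return check_0(n3 + 4, hashed[1:])
--     bonus = 0
--     if hashed and len(hashed[0]) == 1 and hashed[0] in "1234567":
--         bonus = 4 - int(hashed[0]).bit_length()
--     return n3 + bonus
-- ===== Notes on version B (the rewrite author's own statement) =====
-- stated objective: alternative
-- what changed: Replaces the iterative break loop with an if/elif constant chain by a structural recursion that peels leading zeros, and computes the first-character bonus by the closed form 4 - bit_length(d) behind a single membership test instead of the branch chain.
import Mathlib
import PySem

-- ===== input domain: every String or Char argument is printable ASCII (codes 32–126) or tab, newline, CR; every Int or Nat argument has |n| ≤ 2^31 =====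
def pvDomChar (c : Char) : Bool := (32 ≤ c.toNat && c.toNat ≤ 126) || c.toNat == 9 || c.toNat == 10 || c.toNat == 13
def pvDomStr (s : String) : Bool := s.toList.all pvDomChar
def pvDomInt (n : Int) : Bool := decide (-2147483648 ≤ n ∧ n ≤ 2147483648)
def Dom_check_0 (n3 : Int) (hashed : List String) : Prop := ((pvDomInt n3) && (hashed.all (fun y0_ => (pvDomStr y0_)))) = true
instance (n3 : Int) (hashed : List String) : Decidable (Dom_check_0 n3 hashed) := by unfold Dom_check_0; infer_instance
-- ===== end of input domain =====

-- B replaces A's break loop + if/elif constant chain with a structural recursion peeling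
-- leading zeros and a closed-form bonus 4 - bit_length(d) (objective: alternative).

-- ===== PORT A =====
-- for-loop with break: structural recursion; branch chain kept in A's order
def check_0 (n3 : Int) (hashed : List String) : Int :=
  match hashed with
  | [] => n3
  | i :: rest =>
    if i != "0" then
      if i == "1" then n3 + 3
      else if i == "2" || i == "3" then n3 + 2
      else if i == "4" || i == "5" || i == "6" || i == "7" then n3 + 1
      else n3
    else check_0 (n3 + 4) rest

-- ===== PORT B =====
-- int.bit_length(), exact for n ≥ 0 (B only applies it to 1..7)
def pyBitLength (n : Int) : Int :=
  if n == 0 then 0 else Int.ofNat (Nat.log2 n.toNat + 1)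

-- 'len(c)==1 and c in "1234567"': Python substring test equals char membership for a
-- single-char c, ported via the char list (exact); int(c) cannot fail under the guard,
-- so ofStr? is defaulted with 0 (never reached).
def pvBonusOf (c : String) : Int :=
  match c.toList with
  | [d] =>
    if ['1','2','3','4','5','6','7'].contains d then
      4 - pyBitLength ((PySem.Int.ofStr? c).getD 0)
    else 0
  | _ => 0

def check_0_alt (n3 : Int) (hashed : List String) : Int :=
  match hashed with
  | c :: rest =>
    if c == "0" then check_0_alt (n3 + 4) rest
    else n3 + pvBonusOf c
  | [] => n3

-- ===== PRECONDITION & SPEC =====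
def Spec_check_0 (n3 : Int) (hashed : List String) (out : Int) : Prop := out = check_0_alt n3 hashed
instance (n3 : Int) (hashed : List String) (out : Int) : Decidable (Spec_check_0 n3 hashed out) := by unfold Spec_check_0; infer_instance

-- ===== CLAIM (what is proved, stated in full; the proofs are below) =====
def Claim_equal_check_0 : Prop := ∀ (n3 : Int) (hashed : List String), Dom_check_0 n3 hashed → Spec_check_0 n3 hashed (check_0 n3 hashed)

-- ===== LEMMAS AND PROOFS =====

-- the closed-form bonus agrees with A's branch chain on every string
theorem pvBonusOf_eq_chain (c : String) :
    pvBonusOf c =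
      (if c == "1" then 3
       else if c == "2" || c == "3" then 2
       else if c == "4" || c == "5" || c == "6" || c == "7" then 1
       else 0 : Int) := by
  by_cases h1 : c = "1" <;> by_cases h2 : c = "2" <;> by_cases h3 : c = "3" <;>
    by_cases h4 : c = "4" <;> by_cases h5 : c = "5" <;> by_cases h6 : c = "6" <;>
    by_cases h7 : c = "7"
  all_goals try (subst_vars; decide)
  -- c is none of "1".."7": chain is 0, and the guard in pvBonusOf is false
  have hch : (if c == "1" then 3
       else if c == "2" || c == "3" then 2
       else if c == "4" || c == "5" || c == "6" || c == "7" then 1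
       else 0 : Int) = 0 := by
    simp [h1, h2, h3, h4, h5, h6, h7]
  rw [hch]
  rcases hl : c.toList with _ | ⟨d, _ | ⟨e, t⟩⟩
  · simp [pvBonusOf, hl]
  · have hc : c = String.ofList [d] := by rw [← hl, String.ofList_toList]
    simp [pvBonusOf, hl]
    rintro (rfl | rfl | rfl | rfl | rfl | rfl | rfl) <;> subst hc <;>
      first
        | exact (h1 (by decide)).elim | exact (h2 (by decide)).elim
        | exact (h3 (by decide)).elim | exact (h4 (by decide)).elim
        | exact (h5 (by decide)).elim | exact (h6 (by decide)).elim
        | exact (h7 (by decide)).elim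
  · simp [pvBonusOf, hl]

theorem check_0_eq_alt (hashed : List String) : ∀ n3 : Int, check_0 n3 hashed = check_0_alt n3 hashed := by
  induction hashed with
  | nil => intro n3; rfl
  | cons c rest ih =>
    intro n3
    by_cases h0 : c = "0"
    · subst h0
      simpa [check_0, check_0_alt] using ih (n3 + 4)
    · have hne : (c != "0") = true := by simp [h0]
      have heq : (c == "0") = false := by simp [h0]
      have hA : check_0 n3 (c :: rest) =
          (if c == "1" then n3 + 3
           else if c == "2" || c == "3" then n3 + 2
           else if c == "4" || c == "5" || c == "6" || c == "7" then n3 + 1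
           else n3) := by
        simp [check_0, hne]
      have hB : check_0_alt n3 (c :: rest) = n3 + pvBonusOf c := by
        simp [check_0_alt, heq]
      rw [hA, hB, pvBonusOf_eq_chain c]
      split_ifs <;> ring

-- ===== VERDICT (by name: the statement is the Claim_ definition above) =====
theorem check_0_spec : Claim_equal_check_0 := by
  intro n3 hashed _
  unfold Spec_check_0
  exact check_0_eq_alt hashed n3
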